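-- pv_equiv track=rewrite | github.com/Assan29/LEET_CODES-Random-50Q- | LEET_CODES(Random 50Q).py | lc_2160
-- ===== SOURCE A (Python) =====
-- def lc_2160(num):
--
--     '''
--     You are given a positive integer num consisting of exactly four digits. Split num into two new integers new1 and new2
--     by using the digits found in num. Leading zeros are allowed in new1 and new2, and all the digits found in num must be used.
--     For example, given num = 2932, you have the following digits: two 2's, one 9 and one 3.
--     Some of the possible pairs [new1, new2] are [22, 93], [23, 92], [223, 9] and [2, 329].
--     Return the minimum possible sum of new1 and new2.
--
--     EXAMPLE:
--     Input: num = 2932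
--     Output: 52
--     Explanation: Some possible pairs [new1, new2] are [29, 23], [223, 9], etc.
--     The minimum sum can be obtained by the pair [29, 23]: 29 + 23 = 52.
--     '''
--
--     digits = [int(d) for d in str(num)]
--     digits.sort()
--     new1 = 0
--     new2 = 0
--     for i in range(len(digits)):
--         if i % 2 == 0:
--             new1 = new1 * 10 + digits[i]
--         else:
--             new2 = new2 * 10 + digits[i]
--     return new1 + new2
-- ===== SOURCE B (Python) =====
-- def lc_2160(num):
--     digits = sorted(int(d) for d in str(num))
--
--     def go(ds, a, b):
--         # consume the sorted digits left to right, swapping the two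
--         # accumulators at each step instead of testing index parity
--         if not ds:
--             return a + b
--         return go(ds[1:], b, a * 10 + ds[0])
--
--     return go(digits, 0, 0)
-- ===== Notes on version B (the rewrite author's own statement) =====
-- stated objective: simpler
-- what changed: Replaces the index loop with its i % 2 parity branch and two fixed accumulator roles by a structural recursion over the sorted digit list that swaps the two accumulators at every step, so no index or modulo test is needed.
import Mathlib
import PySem

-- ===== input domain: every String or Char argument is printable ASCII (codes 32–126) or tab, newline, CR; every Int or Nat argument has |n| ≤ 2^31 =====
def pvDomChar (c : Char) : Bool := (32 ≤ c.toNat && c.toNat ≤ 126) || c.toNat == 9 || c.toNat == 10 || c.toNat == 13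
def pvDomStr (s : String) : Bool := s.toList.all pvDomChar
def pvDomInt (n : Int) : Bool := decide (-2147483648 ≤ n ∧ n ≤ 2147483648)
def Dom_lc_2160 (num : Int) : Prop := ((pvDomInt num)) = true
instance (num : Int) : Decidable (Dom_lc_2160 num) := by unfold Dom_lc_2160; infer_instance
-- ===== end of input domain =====

-- B replaces the index loop with its i % 2 parity branch by a structural recursion
-- over the sorted digit list that swaps the two accumulators at each step (objective: simpler).


-- ===== PORT A =====
-- digits = [int(d) for d in str(num)] ; the .getD 0 is never taken on Pre_ (every char of
-- str(num) for num ≥ 0 is a digit, where int(d) succeeds)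
def lc_2160 (num : Int) : Int :=
  let digits : List Int :=
    (PySem.Int.toChars num).map (fun c => (PySem.Int.ofChars? [c]).getD 0)
  let digits := PySem.List.sorted digits (fun x => x) false
  let r :=
    (PySem.List.pyRange 0 (digits.length : Int) 1).foldl
      (fun (p : Int × Int) i =>
        if PySem.Int.mod i 2 == 0 then (p.1 * 10 + PySem.List.pyGetD digits i 0, p.2)
        else (p.1, p.2 * 10 + PySem.List.pyGetD digits i 0))
      (0, 0)
  r.1 + r.2

-- ===== PORT B =====
def lc2160Go : List Int → Int → Int → Int
  | [], a, b => a + b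
  | x :: r, a, b => lc2160Go r b (a * 10 + x)

def lc_2160_alt (num : Int) : Int :=
  let digits : List Int :=
    PySem.List.sorted ((PySem.Int.toChars num).map (fun c => (PySem.Int.ofChars? [c]).getD 0))
      (fun x => x) false
  lc2160Go digits 0 0

-- ===== PRECONDITION & SPEC =====
-- Pre_ excludes negative num, where str(num) starts with '-' and int('-') raises ValueError in A (and in B).
def Pre_lc_2160 (num : Int) : Prop := 0 ≤ num
instance (num : Int) : Decidable (Pre_lc_2160 num) := by unfold Pre_lc_2160; infer_instance
def pvWitness_lc_2160 : Int := (2932)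

def Spec_lc_2160 (num : Int) (out : Int) : Prop := out = lc_2160_alt num
instance (num : Int) (out : Int) : Decidable (Spec_lc_2160 num out) := by unfold Spec_lc_2160; infer_instance

-- ===== CLAIM (what is proved, stated in full; the proofs are below) =====
def Claim_equal_lc_2160 : Prop := ∀ (num : Int), Dom_lc_2160 num → Pre_lc_2160 num → Spec_lc_2160 num (lc_2160 num)

-- ===== LEMMAS AND PROOFS =====

-- A's indexed parity fold, started at index j, computes B's swapping recursion on the
-- remaining suffix; the accumulators enter swapped when j is odd.
lemma foldA_go (ds : List Int) (j : Nat) (a b : Int) :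
    (let r :=
      (PySem.List.pyRange (j : Int) (ds.length : Int) 1).foldl
        (fun (p : Int × Int) i =>
          if PySem.Int.mod i 2 == 0 then (p.1 * 10 + PySem.List.pyGetD ds i 0, p.2)
          else (p.1, p.2 * 10 + PySem.List.pyGetD ds i 0))
        (a, b);
      r.1 + r.2) =
    (if j % 2 = 0 then lc2160Go (ds.drop j) a b else lc2160Go (ds.drop j) b a) := by
  by_cases h : j < ds.length
  · have hcons : PySem.List.pyRange (j : Int) (ds.length : Int) 1
        = (j : Int) :: PySem.List.pyRange ((j : Int) + 1) (ds.length : Int) 1 :=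
      PySem.List.pyRange_one_cons (by exact_mod_cast h)
    have hget : PySem.List.pyGetD ds (j : Int) 0 = ds.getD j 0 := by
      rw [PySem.List.pyGetD_natCast]
    have hmod : PySem.Int.mod (j : Int) 2 = ((j % 2 : Nat) : Int) :=
      PySem.Int.mod_natCast j 2
    have hdrop : ds.drop j = ds.getD j 0 :: ds.drop (j + 1) := by
      rw [List.getD_eq_getElem _ _ h]
      exact (List.drop_eq_getElem_cons h)
    have ih := foldA_go ds (j + 1)
    rcases Nat.even_or_odd j with hj | hj
    · have hj0 : j % 2 = 0 := Nat.even_iff.mp hj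
      have hcond : (PySem.Int.mod ((j : Nat) : Int) 2 == 0) = true := by
        rw [hmod, hj0]; rfl
      have ih' := ih (a * 10 + ds.getD j 0) b
      rw [if_neg (by omega : ¬ ((j + 1) % 2 = 0))] at ih'
      push_cast at ih'
      rw [if_pos hj0, hdrop]
      simp only [hcons, List.foldl_cons, hcond, reduceIte, hget, lc2160Go]
      exact ih'
    · have hj0 : j % 2 = 1 := Nat.odd_iff.mp hj
      have hcond : (PySem.Int.mod ((j : Nat) : Int) 2 == 0) = false := by
        rw [hmod, hj0]; rfl
      have ih' := ih a (b * 10 + ds.getD j 0)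
      rw [if_pos (by omega : (j + 1) % 2 = 0)] at ih'
      push_cast at ih'
      rw [if_neg (by omega : ¬ (j % 2 = 0)), hdrop]
      simp only [hcons, List.foldl_cons, hcond, Bool.false_eq_true, reduceIte, hget, lc2160Go]
      exact ih'
  · have hnil : PySem.List.pyRange (j : Int) (ds.length : Int) 1 = [] :=
      PySem.List.pyRange_one_eq_nil (by exact_mod_cast Nat.le_of_not_lt h)
    have hdrop : ds.drop j = [] := List.drop_eq_nil_of_le (Nat.le_of_not_lt h)
    simp only [hnil, List.foldl_nil, hdrop, lc2160Go]
    split <;> ring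
termination_by ds.length - j

-- ===== VERDICT (by name: the statement is the Claim_ definition above) =====
theorem lc_2160_spec : Claim_equal_lc_2160 := by
  intro num _ _
  unfold Spec_lc_2160 lc_2160 lc_2160_alt
  have h := foldA_go
    (PySem.List.sorted ((PySem.Int.toChars num).map (fun c => (PySem.Int.ofChars? [c]).getD 0))
      (fun x => x) false) 0 0 0
  simpa using h
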